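-- pv_equiv track=rewrite | github.com/DeppieK/VoiceAndAudioSignalProcessing | assignment.py | find_word_boundaries
-- ===== SOURCE A (Python) =====
-- def find_word_boundaries(filtered_representation):
--
--     word_boundaries = []
--     in_word = False
--     start_idx = 0
--
--     #loop to find the boundaries
--     for i, val in enumerate(filtered_representation):
--         if val == 1 and not in_word: #if 1 then foreground sound (word)
--             #start of a new word
--             start_idx = i
--             in_word = True
--
--         elif val == 0 and in_word: #else background sound
--             #end of the current word
--             word_boundaries.append((start_idx, i - 1))
--             in_word = False
--
--     #if the representation ends in a word
--     if in_word:
--         word_boundaries.append((start_idx, len(filtered_representation) - 1))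
--
--     return word_boundaries
-- ===== SOURCE B (Python) =====
-- def find_word_boundaries(filtered_representation):
--     # Two-pointer scan: when a word opens at i (value == 1), an inner pointer j
--     # consumes the whole word (values != 0), then we jump i to j.
--     word_boundaries = []
--     n = len(filtered_representation)
--     i = 0
--     while i < n:
--         if filtered_representation[i] == 1:
--             j = i + 1
--             while j < n and filtered_representation[j] != 0:
--                 j += 1
--             word_boundaries.append((i, j - 1))
--             i = j
--         else:
--             i += 1
--     return word_boundaries
-- ===== Notes on version B (the rewrite author's own statement) =====
-- stated objective: alternative
-- what changed: Replaces the persistent in_word flag and 0-transition toggling with a two-pointer loop that, on seeing a 1, consumes the whole word with an inner forward scan and emits the pair immediately.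
import Mathlib
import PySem

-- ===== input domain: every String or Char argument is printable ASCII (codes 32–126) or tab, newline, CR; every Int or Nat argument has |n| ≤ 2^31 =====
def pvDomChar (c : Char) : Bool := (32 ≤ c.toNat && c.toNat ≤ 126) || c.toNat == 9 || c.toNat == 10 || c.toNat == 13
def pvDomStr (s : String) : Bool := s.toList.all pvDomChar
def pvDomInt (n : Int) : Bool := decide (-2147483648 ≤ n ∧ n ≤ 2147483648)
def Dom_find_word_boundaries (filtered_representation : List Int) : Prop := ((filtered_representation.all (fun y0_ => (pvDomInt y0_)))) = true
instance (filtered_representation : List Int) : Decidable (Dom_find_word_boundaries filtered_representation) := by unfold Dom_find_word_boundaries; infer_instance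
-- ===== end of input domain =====

-- ===== PORT A =====
-- A = B on all inputs; B replaces the in_word flag with a two-pointer word-consuming scan.
def aLoop : List Int → Int → List (Int × Int) → Bool → Int → (List (Int × Int) × Bool × Int)
  | [], _, acc, inw, s => (acc, inw, s)
  | v :: rest, i, acc, inw, s =>
    if v == 1 && !inw then aLoop rest (i+1) acc true i
    else if v == 0 && inw then aLoop rest (i+1) (acc ++ [(s, i-1)]) false s
    else aLoop rest (i+1) acc inw s

def find_word_boundaries (filtered_representation : List Int) : List (Int × Int) :=
  let st := aLoop filtered_representation 0 [] false 0
  if st.2.1 then st.1 ++ [(st.2.2, (filtered_representation.length : Int) - 1)] else st.1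

-- ===== PORT B =====
-- inner scan: advance j while the value is != 0; returns the remaining suffix and j
def bConsume : List Int → Int → (List Int × Int)
  | [], j => ([], j)
  | v :: rest, j => if v == 0 then (v :: rest, j) else bConsume rest (j+1)

theorem bConsume_len : ∀ (l : List Int) (j : Int), (bConsume l j).1.length ≤ l.length := by
  intro l
  induction l with
  | nil => intro j; simp [bConsume]
  | cons v rest ih =>
    intro j
    simp only [bConsume]
    split
    · simp
    · exact le_trans (ih (j+1)) (Nat.le_succ _)

def bAux : List Int → Int → List (Int × Int)
  | [], _ => []
  | v :: rest, i =>
    if v == 1 then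
      let p := bConsume rest (i+1)
      (i, p.2 - 1) :: bAux p.1 p.2
    else bAux rest (i+1)
termination_by l _ => l.length
decreasing_by
  · exact Nat.lt_succ_of_le (bConsume_len rest (i+1))
  · simp

def find_word_boundaries_alt (filtered_representation : List Int) : List (Int × Int) :=
  bAux filtered_representation 0

-- ===== PRECONDITION & SPEC =====
def Spec_find_word_boundaries (filtered_representation : List Int) (out : List (Int × Int)) : Prop := out = find_word_boundaries_alt filtered_representation
instance (filtered_representation : List Int) (out : List (Int × Int)) : Decidable (Spec_find_word_boundaries filtered_representation out) := by unfold Spec_find_word_boundaries; infer_instance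

-- ===== CLAIM (what is proved, stated in full; the proofs are below) =====
def Claim_equal_find_word_boundaries : Prop := ∀ (filtered_representation : List Int), Dom_find_word_boundaries filtered_representation → Spec_find_word_boundaries filtered_representation (find_word_boundaries filtered_representation)

-- ===== LEMMAS AND PROOFS =====
-- finish st n: apply A's trailing "if in_word" append, n being the total length offset
def aFinish (st : List (Int × Int) × Bool × Int) (n : Int) : List (Int × Int) :=
  if st.2.1 then st.1 ++ [(st.2.2, n - 1)] else st.1

theorem aLoop_main : ∀ (l : List Int) (i : Int) (acc : List (Int × Int)) ,
    (∀ s, aFinish (aLoop l i acc false s) (i + l.length) = acc ++ bAux l i) ∧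
    (∀ s, aFinish (aLoop l i acc true s) (i + l.length) = acc ++ (s, (bConsume l i).2 - 1) :: bAux (bConsume l i).1 (bConsume l i).2) := by
  intro l
  induction l with
  | nil =>
    intro i acc
    constructor
    · intro s; simp [aLoop, aFinish, bAux]
    · intro s; simp [aLoop, aFinish, bAux, bConsume]
  | cons v rest ih =>
    intro i acc
    have hl : (i + ((v :: rest).length : Int)) = (i+1) + (rest.length : Int) := by
      push_cast [List.length_cons]; ring
    constructor
    · intro s
      rw [hl]
      by_cases h1 : v = 1
      · subst h1
        simpa [aLoop, bAux] using (ih (i+1) acc).2 i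
      · simpa [aLoop, bAux, show (v == 1) = false by simp [h1]] using (ih (i+1) acc).1 s
    · intro s
      rw [hl]
      by_cases h0 : v = 0
      · subst h0
        simpa [aLoop, bConsume, bAux] using (ih (i+1) (acc ++ [(s, i-1)])).1 s
      · simpa [aLoop, bConsume, show (v == 0) = false by simp [h0]] using (ih (i+1) acc).2 s

-- ===== VERDICT (by name: the statement is the Claim_ definition above) =====
theorem find_word_boundaries_spec : Claim_equal_find_word_boundaries := by
  intro l _
  show find_word_boundaries l = find_word_boundaries_alt l
  have h := (aLoop_main l 0 []).1 0
  simp only [zero_add] at h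
  simpa [find_word_boundaries, find_word_boundaries_alt, aFinish] using h
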